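-- pv_equiv track=rewrite | github.com/coolum001/RotateLEDDigits | max7219_rotated.py | _rotate_matrix_8x8
-- ===== SOURCE A (Python) =====
-- def _rotate_matrix_8x8(src, rotation):
--     """
--     Rotate an 8x8 boolean matrix by the specified angle.
--
--     src[x][y] with x,y in 0..7, origin at top-left.
--     Returns a new 8x8 matrix in the same format.
--     """
--     if rotation == 0:
--         return src
--
--     dst = [[0] * 8 for _ in range(8)]
--
--     if rotation == 90:
--         # Clockwise 90 degrees.
--         for x in range(8):
--             for y in range(8):
--                 dst[x][y] = src[y][7 - x]
--     elif rotation == 180: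
--         for x in range(8):
--             for y in range(8):
--                 dst[x][y] = src[7 - x][7 - y]
--     elif rotation == 270:
--         # Clockwise 270 == counter-clockwise 90.
--         for x in range(8):
--             for y in range(8):
--                 dst[x][y] = src[7 - y][x]
--     else:
--         raise ValueError("Rotation must be one of 0, 90, 180, 270")
--
--     return dst
-- ===== SOURCE B (Python) =====
-- def _rot90(m):
--     # Clockwise 90 degrees: out[i][j] = m[j][7 - i].
--     return [[m[j][7 - i] for j in range(8)] for i in range(8)]
--
--
-- def _rotate_matrix_8x8(src, rotation):
--     if rotation not in (0, 90, 180, 270):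
--         raise ValueError("Rotation must be one of 0, 90, 180, 270")
--     result = src
--     for _ in range(rotation // 90):
--         result = _rot90(result)
--     return result
-- ===== Notes on version B (the rewrite author's own statement) =====
-- stated objective: simpler
-- what changed: Replaces the three hand-written index-formula branches by a single clockwise-90-degree rotation helper applied rotation//90 times, with one up-front validation of the angle.
import Mathlib
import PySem

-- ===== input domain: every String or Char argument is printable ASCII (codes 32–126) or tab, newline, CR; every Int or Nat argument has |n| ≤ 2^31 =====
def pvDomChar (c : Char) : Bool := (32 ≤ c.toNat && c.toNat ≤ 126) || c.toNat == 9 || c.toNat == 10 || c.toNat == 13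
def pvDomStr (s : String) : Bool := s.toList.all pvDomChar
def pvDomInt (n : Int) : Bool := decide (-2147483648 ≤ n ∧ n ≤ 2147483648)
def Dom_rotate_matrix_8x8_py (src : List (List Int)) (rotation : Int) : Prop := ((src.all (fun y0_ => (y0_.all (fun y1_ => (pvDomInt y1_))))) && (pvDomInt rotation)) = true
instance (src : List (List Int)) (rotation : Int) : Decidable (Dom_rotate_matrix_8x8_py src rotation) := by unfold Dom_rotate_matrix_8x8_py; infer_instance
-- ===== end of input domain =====

-- B replaces A's three index-formula branches by one clockwise-90° helper applied rotation//90 times (simpler decomposition, same cost).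


-- shared cell accessor: src[i][j] (IndexError → the default never used inside Pre_)
def pvCell (m : List (List Int)) (i j : Int) : Int :=
  (PySem.List.pyGet? ((PySem.List.pyGet? m i).getD []) j).getD 0

-- ===== PORT A =====
def rotate_matrix_8x8_py (src : List (List Int)) (rotation : Int) : List (List Int) :=
  if rotation = 0 then src
  else if rotation = 90 then
    (List.range 8).map (fun x => (List.range 8).map (fun y => pvCell src (y : Int) (7 - (x : Int))))
  else if rotation = 180 then
    (List.range 8).map (fun x => (List.range 8).map (fun y => pvCell src (7 - (x : Int)) (7 - (y : Int))))
  else if rotation = 270 then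
    (List.range 8).map (fun x => (List.range 8).map (fun y => pvCell src (7 - (y : Int)) (x : Int)))
  else []  -- ValueError in Python; excluded by Pre_

-- ===== PORT B =====
def pvRot90 (m : List (List Int)) : List (List Int) :=
  (List.range 8).map (fun i => (List.range 8).map (fun j => pvCell m (j : Int) (7 - (i : Int))))

def rotate_matrix_8x8_py_alt (src : List (List Int)) (rotation : Int) : List (List Int) :=
  if rotation = 0 ∨ rotation = 90 ∨ rotation = 180 ∨ rotation = 270 then
    pvRot90^[(PySem.Int.floordiv rotation 90).toNat] src
  else []  -- ValueError in Python; excluded by Pre_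

-- ===== PRECONDITION & SPEC =====
-- Pre_ excludes exactly the inputs where Python A raises: rotation outside {0,90,180,270}
-- (ValueError), and for nonzero rotation a src without an 8x8 top-left block (IndexError).
def Pre_rotate_matrix_8x8_py (src : List (List Int)) (rotation : Int) : Prop :=
  rotation = 0 ∨
    ((rotation = 90 ∨ rotation = 180 ∨ rotation = 270) ∧
      8 ≤ src.length ∧ ∀ r ∈ src.take 8, 8 ≤ r.length)
instance (src : List (List Int)) (rotation : Int) : Decidable (Pre_rotate_matrix_8x8_py src rotation) := by unfold Pre_rotate_matrix_8x8_py; infer_instance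

def pvWitness_rotate_matrix_8x8_py : List (List Int) × Int :=
  ([[0,1,0,0,0,0,0,0],[0,0,1,0,0,0,0,0],[0,0,0,0,0,0,0,0],[0,0,0,0,0,0,0,0],
    [0,0,0,0,0,0,0,0],[0,0,0,0,0,0,0,0],[0,0,0,0,0,0,0,0],[1,0,0,0,0,0,0,0]], 90)

def Spec_rotate_matrix_8x8_py (src : List (List Int)) (rotation : Int) (out : List (List Int)) : Prop := out = rotate_matrix_8x8_py_alt src rotation
instance (src : List (List Int)) (rotation : Int) (out : List (List Int)) : Decidable (Spec_rotate_matrix_8x8_py src rotation out) := by unfold Spec_rotate_matrix_8x8_py; infer_instance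

-- ===== CLAIM (what is proved, stated in full; the proofs are below) =====
def Claim_equal_rotate_matrix_8x8_py : Prop := ∀ (src : List (List Int)) (rotation : Int), Dom_rotate_matrix_8x8_py src rotation → Pre_rotate_matrix_8x8_py src rotation → Spec_rotate_matrix_8x8_py src rotation (rotate_matrix_8x8_py src rotation)

-- ===== LEMMAS AND PROOFS =====

theorem rot90_once (src : List (List Int)) :
    pvRot90 src =
      (List.range 8).map (fun x => (List.range 8).map (fun y => pvCell src (y : Int) (7 - (x : Int)))) := rfl

theorem rot90_twice (src : List (List Int)) :
    pvRot90 (pvRot90 src) =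
      (List.range 8).map (fun x => (List.range 8).map (fun y => pvCell src (7 - (x : Int)) (7 - (y : Int)))) := by
  rfl

theorem rot90_thrice (src : List (List Int)) :
    pvRot90 (pvRot90 (pvRot90 src)) =
      (List.range 8).map (fun x => (List.range 8).map (fun y => pvCell src (7 - (y : Int)) (x : Int))) := by
  rfl

-- ===== VERDICT (by name: the statement is the Claim_ definition above) =====
theorem rotate_matrix_8x8_py_spec : Claim_equal_rotate_matrix_8x8_py := by
  intro src rotation _ hpre
  unfold Spec_rotate_matrix_8x8_py rotate_matrix_8x8_py rotate_matrix_8x8_py_alt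
  rcases hpre with h0 | ⟨h90 | h180 | h270, _⟩
  · subst h0
    rw [if_pos rfl, if_pos (Or.inl rfl)]; rfl
  · subst h90
    rw [if_neg (by decide), if_pos rfl, if_pos (by decide)]
    exact (rot90_once src).symm
  · subst h180
    rw [if_neg (by decide), if_neg (by decide), if_pos rfl, if_pos (by decide)]
    exact (rot90_twice src).symm
  · subst h270
    rw [if_neg (by decide), if_neg (by decide), if_neg (by decide), if_pos rfl, if_pos (by decide)]
    exact (rot90_thrice src).symm
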